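-- pv_equiv track=rewrite | github.com/RomanRetsen/code_clash | walker_tasks/labs109.py | crag_score
-- ===== SOURCE A (Python) =====
-- from itertools import product
--
-- def generate_all_categories():
--     all_categories = {(1, 50): set(), (2, 26): set(), (3, 25): set(), \
--                       (4, 20):set(), (5, 20):set(), (6, 20):set(), (7, 20): set(), \
--                       (8, 18): set(), (9, 12): set(), (10, 6): set(), \
--                       (11, 15): set(), (12, 10): set(), (13, 5): set(), \
--                       (14, 12): set(), (15, 8): set(), (16, 4): set(), \
--                       (17, 9): set(), (18, 6): set(), (19, 3): set(), \
--                       (20, 6): set(), (21, 4): set(), (22, 2): set(), \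
--                       (23, 3): set(), (24, 2): set(), (25, 1): set()
--                       }
--     for comb in product([1,2,3,4,5,6], repeat=3):
--         sorted_comb = tuple(sorted(comb))
--         if sum(comb) == 13:
--             if len(set(comb)) == 2:
--                 all_categories[(1,50)].add(sorted_comb)
--             all_categories[(2, 26)].add(sorted_comb)
--         if len(set(comb)) == 1:
--             all_categories[(3, 25)].add(sorted_comb)
--         if sorted_comb == (1,2,3):
--             all_categories[(4, 20)].add(sorted_comb)
--         if sorted_comb == (4,5,6):
--             all_categories[(5, 20)].add(sorted_comb)
--         if sorted_comb == (1,3,5):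
--             all_categories[(6, 20)].add(sorted_comb)
--         if sorted_comb == (2,4,6):
--             all_categories[(7, 20)].add(sorted_comb)
--         if sorted_comb.count(6) == 3:
--             all_categories[(8, 18)].add(sorted_comb)
--         elif sorted_comb.count(6) == 2:
--             all_categories[(9, 12)].add(sorted_comb)
--         elif sorted_comb.count(6) == 1:
--             all_categories[(10, 6)].add(sorted_comb)
--         if sorted_comb.count(5) == 3:
--             all_categories[(11, 15)].add(sorted_comb)
--         elif sorted_comb.count(5) == 2:
--             all_categories[(12, 10)].add(sorted_comb)
--         elif sorted_comb.count(5) == 1: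
--             all_categories[(13, 5)].add(sorted_comb)
--         if sorted_comb.count(4) == 3:
--             all_categories[(14, 12)].add(sorted_comb)
--         elif sorted_comb.count(4) == 2:
--             all_categories[(15, 8)].add(sorted_comb)
--         elif sorted_comb.count(4) == 1:
--             all_categories[(16, 4)].add(sorted_comb)
--         if sorted_comb.count(3) == 3:
--             all_categories[(17, 9)].add(sorted_comb)
--         elif sorted_comb.count(3) == 2:
--             all_categories[(18, 6)].add(sorted_comb)
--         elif sorted_comb.count(3) == 1:
--             all_categories[(19, 3)].add(sorted_comb)
--         if sorted_comb.count(2) == 3: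
--             all_categories[(20, 6)].add(sorted_comb)
--         elif sorted_comb.count(2) == 2:
--             all_categories[(21, 4)].add(sorted_comb)
--         elif sorted_comb.count(2) == 1:
--             all_categories[(22, 2)].add(sorted_comb)
--         if sorted_comb.count(1) == 3:
--             all_categories[(23, 3)].add(sorted_comb)
--         elif sorted_comb.count(1) == 2:
--             all_categories[(24, 2)].add(sorted_comb)
--         elif sorted_comb.count(1) == 1:
--             all_categories[(25, 1)].add(sorted_comb)
--     return all_categories
--
-- def crag_score(dice):
--     sorted_dice = tuple(sorted(dice))
--     for category_result, category_combinations \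
--             in sorted(generate_all_categories().items(), key=lambda x:x[0][1], reverse=True):
--         if sorted_dice in category_combinations:
--             return category_result[1]
--     else:
--         return 0
-- ===== SOURCE B (Python) =====
-- def _score_sorted(s):
--     # s is the sorted roll; score it directly, no category table
--     if len(s) != 3 or any(d < 1 or d > 6 for d in s):
--         return 0
--     distinct = len(set(s))
--     best = 0
--     if sum(s) == 13:
--         best = 50 if distinct == 2 else 26
--     if distinct == 1:
--         best = max(best, 25)
--     if s in ([1, 2, 3], [4, 5, 6], [1, 3, 5], [2, 4, 6]):
--         best = max(best, 20)
--     for f in range(1, 7):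
--         best = max(best, f * s.count(f))
--     return best
--
-- def crag_score(dice):
--     return _score_sorted(sorted(dice))
-- ===== Notes on version B (the rewrite author's own statement) =====
-- stated objective: simpler
-- what changed: Drops the per-call generation of the full 216-roll category table and its highest-score-first scan; B validates the sorted roll and returns the max over qualifying scores computed directly (13-sum/crag, triple, the four 20-point straights, face counts).
import Mathlib
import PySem

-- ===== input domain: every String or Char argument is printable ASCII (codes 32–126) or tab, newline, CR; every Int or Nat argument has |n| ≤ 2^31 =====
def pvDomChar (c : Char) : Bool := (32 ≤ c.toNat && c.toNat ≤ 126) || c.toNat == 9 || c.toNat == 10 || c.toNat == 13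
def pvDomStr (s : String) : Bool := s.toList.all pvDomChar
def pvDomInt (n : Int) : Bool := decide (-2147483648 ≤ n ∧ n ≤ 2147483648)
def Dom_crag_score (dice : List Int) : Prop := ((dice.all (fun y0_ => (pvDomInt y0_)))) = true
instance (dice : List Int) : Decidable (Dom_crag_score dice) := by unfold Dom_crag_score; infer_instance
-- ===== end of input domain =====

-- B replaces A's per-call generation of the full 216-roll category table with direct
-- arithmetic scoring of the sorted roll (objective: simpler).

-- ===== PORT A =====
def cragCombs : List (List Int) :=
  [1, 2, 3, 4, 5, 6].flatMap fun a =>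
    [1, 2, 3, 4, 5, 6].flatMap fun b =>
      [1, 2, 3, 4, 5, 6].map fun c => [a, b, c]

def addCat (d : PySem.Dict (Int × Int) (PySem.Set (List Int))) (k : Int × Int)
    (t : List Int) : PySem.Dict (Int × Int) (PySem.Set (List Int)) :=
  d.modify k PySem.Set.empty (fun s => PySem.Set.add s t)

def cragStep (d : PySem.Dict (Int × Int) (PySem.Set (List Int))) (comb : List Int) :
    PySem.Dict (Int × Int) (PySem.Set (List Int)) :=
  let sc := PySem.List.sorted comb (fun x => x) false
  let d := if comb.sum == 13 then
      let d := if PySem.Set.len (PySem.Set.ofList comb) == 2 then addCat d (1, 50) sc else d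
      addCat d (2, 26) sc
    else d
  let d := if PySem.Set.len (PySem.Set.ofList comb) == 1 then addCat d (3, 25) sc else d
  let d := if sc == [1, 2, 3] then addCat d (4, 20) sc else d
  let d := if sc == [4, 5, 6] then addCat d (5, 20) sc else d
  let d := if sc == [1, 3, 5] then addCat d (6, 20) sc else d
  let d := if sc == [2, 4, 6] then addCat d (7, 20) sc else d
  let d := if PySem.List.count sc 6 == 3 then addCat d (8, 18) sc
           else if PySem.List.count sc 6 == 2 then addCat d (9, 12) sc
           else if PySem.List.count sc 6 == 1 then addCat d (10, 6) sc else d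
  let d := if PySem.List.count sc 5 == 3 then addCat d (11, 15) sc
           else if PySem.List.count sc 5 == 2 then addCat d (12, 10) sc
           else if PySem.List.count sc 5 == 1 then addCat d (13, 5) sc else d
  let d := if PySem.List.count sc 4 == 3 then addCat d (14, 12) sc
           else if PySem.List.count sc 4 == 2 then addCat d (15, 8) sc
           else if PySem.List.count sc 4 == 1 then addCat d (16, 4) sc else d
  let d := if PySem.List.count sc 3 == 3 then addCat d (17, 9) sc
           else if PySem.List.count sc 3 == 2 then addCat d (18, 6) sc
           else if PySem.List.count sc 3 == 1 then addCat d (19, 3) sc else d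
  let d := if PySem.List.count sc 2 == 3 then addCat d (20, 6) sc
           else if PySem.List.count sc 2 == 2 then addCat d (21, 4) sc
           else if PySem.List.count sc 2 == 1 then addCat d (22, 2) sc else d
  let d := if PySem.List.count sc 1 == 3 then addCat d (23, 3) sc
           else if PySem.List.count sc 1 == 2 then addCat d (24, 2) sc
           else if PySem.List.count sc 1 == 1 then addCat d (25, 1) sc else d
  d

def generateAllCategories : PySem.Dict (Int × Int) (PySem.Set (List Int)) :=
  cragCombs.foldl cragStep (PySem.Dict.ofList
    [((1, 50), PySem.Set.empty), ((2, 26), PySem.Set.empty), ((3, 25), PySem.Set.empty),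
     ((4, 20), PySem.Set.empty), ((5, 20), PySem.Set.empty), ((6, 20), PySem.Set.empty),
     ((7, 20), PySem.Set.empty), ((8, 18), PySem.Set.empty), ((9, 12), PySem.Set.empty),
     ((10, 6), PySem.Set.empty), ((11, 15), PySem.Set.empty), ((12, 10), PySem.Set.empty),
     ((13, 5), PySem.Set.empty), ((14, 12), PySem.Set.empty), ((15, 8), PySem.Set.empty),
     ((16, 4), PySem.Set.empty), ((17, 9), PySem.Set.empty), ((18, 6), PySem.Set.empty),
     ((19, 3), PySem.Set.empty), ((20, 6), PySem.Set.empty), ((21, 4), PySem.Set.empty),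
     ((22, 2), PySem.Set.empty), ((23, 3), PySem.Set.empty), ((24, 2), PySem.Set.empty),
     ((25, 1), PySem.Set.empty)])

-- the for-loop with its for-else: first category (in descending-score order) containing the roll
def scanCats : List ((Int × Int) × PySem.Set (List Int)) → List Int → Int
  | [], _ => 0
  | (cat, combos) :: rest, sd =>
      if PySem.Set.contains combos sd then cat.2 else scanCats rest sd

def crag_score (dice : List Int) : Int :=
  scanCats (PySem.List.sorted (generateAllCategories.items) (fun x => x.1.2) true)
           (PySem.List.sorted dice (fun x => x) false)

-- ===== PORT B =====
def scoreSorted (s : List Int) : Int :=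
  if s.length != 3 || s.any (fun d => decide (d < 1) || decide (d > 6)) then 0
  else
    let distinct := PySem.Set.len (PySem.Set.ofList s)
    let best : Int := if s.sum == 13 then (if distinct == 2 then 50 else 26) else 0
    let best := if distinct == 1 then max best 25 else best
    let best := if s == [1, 2, 3] || s == [4, 5, 6] || s == [1, 3, 5] || s == [2, 4, 6] then
        max best 20 else best
    (PySem.List.pyRange 1 7 1).foldl (fun b f => max b (f * PySem.List.count s f)) best

def crag_score_alt (dice : List Int) : Int :=
  scoreSorted (PySem.List.sorted dice (fun x => x) false)

-- ===== PRECONDITION & SPEC =====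
def Spec_crag_score (dice : List Int) (out : Int) : Prop := out = crag_score_alt dice
instance (dice : List Int) (out : Int) : Decidable (Spec_crag_score dice out) := by unfold Spec_crag_score; infer_instance

-- ===== CLAIM (what is proved, stated in full; the proofs are below) =====
def Claim_equal_crag_score : Prop := ∀ (dice : List Int), Dom_crag_score dice → Spec_crag_score dice (crag_score dice)

-- ===== LEMMAS AND PROOFS =====
-- A's sorted category table, written out as a literal (verified by kernel evaluation below)
def litTable : List ((Int × Int) × List (List Int)) := [
  ((1, 50), [[1, 6, 6], [3, 5, 5], [4, 4, 5]]),
  ((2, 26), [[1, 6, 6], [2, 5, 6], [3, 4, 6], [3, 5, 5], [4, 4, 5]]),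
  ((3, 25), [[1, 1, 1], [2, 2, 2], [3, 3, 3], [4, 4, 4], [5, 5, 5], [6, 6, 6]]),
  ((4, 20), [[1, 2, 3]]),
  ((5, 20), [[4, 5, 6]]),
  ((6, 20), [[1, 3, 5]]),
  ((7, 20), [[2, 4, 6]]),
  ((8, 18), [[6, 6, 6]]),
  ((11, 15), [[5, 5, 5]]),
  ((9, 12), [[1, 6, 6], [2, 6, 6], [3, 6, 6], [4, 6, 6], [5, 6, 6]]),
  ((14, 12), [[4, 4, 4]]),
  ((12, 10), [[1, 5, 5], [2, 5, 5], [3, 5, 5], [4, 5, 5], [5, 5, 6]]),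
  ((17, 9), [[3, 3, 3]]),
  ((15, 8), [[1, 4, 4], [2, 4, 4], [3, 4, 4], [4, 4, 5], [4, 4, 6]]),
  ((10, 6), [[1, 1, 6], [1, 2, 6], [1, 3, 6], [1, 4, 6], [1, 5, 6], [2, 2, 6], [2, 3, 6], [2, 4, 6], [2, 5, 6], [3, 3, 6], [3, 4, 6], [3, 5, 6], [4, 4, 6], [4, 5, 6], [5, 5, 6]]),
  ((18, 6), [[1, 3, 3], [2, 3, 3], [3, 3, 4], [3, 3, 5], [3, 3, 6]]),
  ((20, 6), [[2, 2, 2]]),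
  ((13, 5), [[1, 1, 5], [1, 2, 5], [1, 3, 5], [1, 4, 5], [1, 5, 6], [2, 2, 5], [2, 3, 5], [2, 4, 5], [2, 5, 6], [3, 3, 5], [3, 4, 5], [3, 5, 6], [4, 4, 5], [4, 5, 6], [5, 6, 6]]),
  ((16, 4), [[1, 1, 4], [1, 2, 4], [1, 3, 4], [1, 4, 5], [1, 4, 6], [2, 2, 4], [2, 3, 4], [2, 4, 5], [2, 4, 6], [3, 3, 4], [3, 4, 5], [3, 4, 6], [4, 5, 5], [4, 5, 6], [4, 6, 6]]),
  ((21, 4), [[1, 2, 2], [2, 2, 3], [2, 2, 4], [2, 2, 5], [2, 2, 6]]),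
  ((19, 3), [[1, 1, 3], [1, 2, 3], [1, 3, 4], [1, 3, 5], [1, 3, 6], [2, 2, 3], [2, 3, 4], [2, 3, 5], [2, 3, 6], [3, 4, 4], [3, 4, 5], [3, 4, 6], [3, 5, 5], [3, 5, 6], [3, 6, 6]]),
  ((23, 3), [[1, 1, 1]]),
  ((22, 2), [[1, 1, 2], [1, 2, 3], [1, 2, 4], [1, 2, 5], [1, 2, 6], [2, 3, 3], [2, 3, 4], [2, 3, 5], [2, 3, 6], [2, 4, 4], [2, 4, 5], [2, 4, 6], [2, 5, 5], [2, 5, 6], [2, 6, 6]]),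
  ((24, 2), [[1, 1, 2], [1, 1, 3], [1, 1, 4], [1, 1, 5], [1, 1, 6]]),
  ((25, 1), [[1, 2, 2], [1, 2, 3], [1, 2, 4], [1, 2, 5], [1, 2, 6], [1, 3, 3], [1, 3, 4], [1, 3, 5], [1, 3, 6], [1, 4, 4], [1, 4, 5], [1, 4, 6], [1, 5, 5], [1, 5, 6], [1, 6, 6]])
]

set_option maxRecDepth 40000 in
theorem htable :
    PySem.List.sorted (generateAllCategories.items) (fun x => x.1.2) true = litTable := by
  decide

theorem hfin : ∀ a ∈ ([1, 2, 3, 4, 5, 6] : List Int), ∀ b ∈ ([1, 2, 3, 4, 5, 6] : List Int),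
    ∀ c ∈ ([1, 2, 3, 4, 5, 6] : List Int), a ≤ b → b ≤ c →
    scanCats litTable [a, b, c] = scoreSorted [a, b, c] := by
  decide

theorem hsets : ∀ e ∈ litTable, ∀ t ∈ e.2, t.length = 3 ∧ ∀ v ∈ t, 1 ≤ v ∧ v ≤ 6 := by
  decide

theorem mem16 (a : Int) (h1 : 1 ≤ a) (h2 : a ≤ 6) : a ∈ ([1, 2, 3, 4, 5, 6] : List Int) := by
  interval_cases a <;> simp

theorem scan_zero (tbl : List ((Int × Int) × PySem.Set (List Int))) (s : List Int)
    (h : ∀ e ∈ tbl, s ∉ e.2) : scanCats tbl s = 0 := by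
  induction tbl with
  | nil => rfl
  | cons e rest ih =>
    obtain ⟨cat, combos⟩ := e
    have hc : PySem.Set.contains combos s = false := by
      rw [← Bool.not_eq_true, PySem.Set.contains_iff]
      exact h _ (List.mem_cons_self)
    simp only [scanCats, hc, Bool.false_eq_true, if_false]
    exact ih (fun e he => h e (List.mem_cons_of_mem _ he))

-- ===== VERDICT (by name: the statement is the Claim_ definition above) =====
theorem crag_score_spec : Claim_equal_crag_score := by
  intro dice _
  unfold Spec_crag_score crag_score crag_score_alt
  rw [htable]
  have hsort : (PySem.List.sorted dice (fun x => x) false).Pairwise (fun a b => a ≤ b) := by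
    simpa using PySem.List.sorted_pairwise dice (fun x => x)
  generalize hsdef : PySem.List.sorted dice (fun x => x) false = s at hsort ⊢
  by_cases hvalid : s.length = 3 ∧ ∀ v ∈ s, 1 ≤ v ∧ v ≤ 6
  · obtain ⟨hlen, hrange⟩ := hvalid
    obtain ⟨a, b, c, heq⟩ := List.length_eq_three.mp hlen
    subst heq
    have hab : a ≤ b := by simp [List.pairwise_cons] at hsort; exact hsort.1.1
    have hbc : b ≤ c := by simp [List.pairwise_cons] at hsort; exact hsort.2
    have ha := hrange a (by simp)
    have hb := hrange b (by simp)
    have hc := hrange c (by simp)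
    exact hfin a (mem16 a ha.1 ha.2) b (mem16 b hb.1 hb.2) c (mem16 c hc.1 hc.2) hab hbc
  · have hz : scoreSorted s = 0 := by
      rw [scoreSorted]
      have hb : (s.length != 3 || s.any (fun d => decide (d < 1) || decide (d > 6))) = true := by
        by_cases hlen : s.length = 3
        · have : ∃ v ∈ s, ¬(1 ≤ v ∧ v ≤ 6) := by
            by_contra hno
            push Not at hno
            exact hvalid ⟨hlen, hno⟩
          obtain ⟨v, hv, hnr⟩ := this
          simp only [Bool.or_eq_true, List.any_eq_true]
          right
          exact ⟨v, hv, by simp only [decide_eq_true_eq]; omega⟩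
        · simp [hlen]
      rw [if_pos hb]
    rw [hz]
    apply scan_zero
    intro e he hmem
    have := hsets e he s hmem
    exact hvalid this
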